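-- pv_equiv track=rewrite | github.com/Halfbonk195/head_crab | lesson_011/02_prime_numbers.py | lucky_number
-- ===== SOURCE A (Python) =====
-- def lucky_number(num):
--     if num < 10:
--         return num
--
--     list_for_numbers = []
--
--     for elem in str(num):
--         list_for_numbers.append(int(elem))
--
--     lenth_of_number = len(list_for_numbers)
--
--     n = lenth_of_number // 2
--     sum_1, sum_2 = 0, 0
--
--     for i in range(0, n):
--         sum_1 += list_for_numbers[i]
--
--     if lenth_of_number % 2:
--         for i in range(n + 1, lenth_of_number):
--             sum_2 += list_for_numbers[i]
--     else:
--         for i in range(n, lenth_of_number):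
--             sum_2 += list_for_numbers[i]
--
--     if sum_1 == sum_2:
--         return num
--     else:
--         return None
-- ===== SOURCE B (Python) =====
-- def lucky_number(num):
--     if num < 10:
--         return num
--     s = str(num)
--     i, j = 0, len(s) - 1
--     sum_left, sum_right = 0, 0
--     while i < j:
--         sum_left += int(s[i])
--         sum_right += int(s[j])
--         i += 1
--         j -= 1
--     return num if sum_left == sum_right else None
-- ===== Notes on version B (the rewrite author's own statement) =====
-- stated objective: alternative
-- what changed: Replaces A's digit-list build plus two (three, counting parity branch) separate forward index loops with a single outside-in two-pointer pass over the digit string, accumulating both half-sums simultaneously and skipping the odd middle digit where the pointers meet.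
import Mathlib
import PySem

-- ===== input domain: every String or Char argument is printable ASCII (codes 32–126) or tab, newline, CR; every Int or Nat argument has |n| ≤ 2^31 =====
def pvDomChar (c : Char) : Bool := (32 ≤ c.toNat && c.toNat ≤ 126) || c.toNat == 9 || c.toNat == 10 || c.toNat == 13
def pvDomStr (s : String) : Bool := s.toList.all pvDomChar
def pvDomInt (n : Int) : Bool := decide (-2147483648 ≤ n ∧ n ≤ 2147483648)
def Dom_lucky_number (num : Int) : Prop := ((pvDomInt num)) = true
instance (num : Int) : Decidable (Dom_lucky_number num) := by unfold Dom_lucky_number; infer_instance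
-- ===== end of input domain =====

-- B replaces A's digit-list build plus two separate forward half-sum loops (with a parity branch)
-- by a single outside-in two-pointer pass over str(num) accumulating both half-sums at once.


-- int(c) for a single character c; for num ≥ 10 every character of str(num) is a digit,
-- so int() never raises there and the .getD 0 default is never taken (exact on the reached inputs).
def pyIntOfChar (c : Char) : Int := (PySem.Int.ofChars? [c]).getD 0

-- ===== PORT A =====
def lucky_number (num : Int) : Option Int :=
  if num < 10 then some num
  else
    -- for elem in str(num): list_for_numbers.append(int(elem))
    let list_for_numbers : List Int :=
      (PySem.Int.toChars num).foldl (fun acc elem => acc ++ [pyIntOfChar elem]) []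
    let lenth_of_number : Int := list_for_numbers.length
    let n : Int := PySem.Int.floordiv lenth_of_number 2
    -- list_for_numbers[i]: every index drawn from the ranges is in range, so the default 0 is never taken
    let sum_1 : Int :=
      (PySem.List.pyRange 0 n 1).foldl (fun s i => s + PySem.List.pyGetD list_for_numbers i 0) 0
    let sum_2 : Int :=
      if PySem.Int.mod lenth_of_number 2 ≠ 0 then
        (PySem.List.pyRange (n + 1) lenth_of_number 1).foldl
          (fun s i => s + PySem.List.pyGetD list_for_numbers i 0) 0
      else
        (PySem.List.pyRange n lenth_of_number 1).foldl
          (fun s i => s + PySem.List.pyGetD list_for_numbers i 0) 0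
    if sum_1 = sum_2 then some num else none

-- ===== PORT B =====
-- while i < j: sum_left += int(s[i]); sum_right += int(s[j]); i += 1; j -= 1
-- s[i] and s[j] are always in range inside the loop, so the default '0' is never taken.
def luckyLoop (s : List Char) (i j sum_left sum_right : Int) : Int × Int :=
  if i < j then
    luckyLoop s (i + 1) (j - 1)
      (sum_left + pyIntOfChar (PySem.List.pyGetD s i '0'))
      (sum_right + pyIntOfChar (PySem.List.pyGetD s j '0'))
  else (sum_left, sum_right)
termination_by (j - i).toNat
decreasing_by omega

def lucky_number_alt (num : Int) : Option Int :=
  if num < 10 then some num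
  else
    let s : List Char := PySem.Int.toChars num
    let p := luckyLoop s 0 ((s.length : Int) - 1) 0 0
    if p.1 = p.2 then some num else none

-- ===== PRECONDITION & SPEC =====
def Spec_lucky_number (num : Int) (out : Option Int) : Prop := out = lucky_number_alt num
instance (num : Int) (out : Option Int) : Decidable (Spec_lucky_number num out) := by unfold Spec_lucky_number; infer_instance

-- ===== CLAIM (what is proved, stated in full; the proofs are below) =====
def Claim_equal_lucky_number : Prop := ∀ (num : Int), Dom_lucky_number num → Spec_lucky_number num (lucky_number num)

-- ===== LEMMAS AND PROOFS =====

-- the digit read at (possibly defaulted) index i of the char list s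
def digAt (s : List Char) (i : Int) : Int := pyIntOfChar (PySem.List.pyGetD s i '0')

-- the two-pointer loop computes exactly the two outer half-sums:
-- c = ⌊(j-i+1)/2⌋ steps, summing indices [i, i+c) on the left and (j-c, j] on the right.
theorem luckyLoop_eq (s : List Char) (c : Nat) :
    ∀ (i j sl sr : Int), (j - i + 1).toNat / 2 = c →
      luckyLoop s i j sl sr =
        (sl + ((PySem.List.pyRange i (i + (c : Int)) 1).map (digAt s)).sum,
         sr + ((PySem.List.pyRange (j + 1 - (c : Int)) (j + 1) 1).map (digAt s)).sum) := by
  induction c with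
  | zero =>
    intro i j sl sr h
    have hji : ¬ i < j := by omega
    rw [luckyLoop, if_neg hji]
    rw [PySem.List.pyRange_one_eq_nil (by omega), PySem.List.pyRange_one_eq_nil (by omega)]
    simp
  | succ c ih =>
    intro i j sl sr h
    have hij : i < j := by omega
    rw [luckyLoop, if_pos hij]
    rw [ih (i + 1) (j - 1) _ _ (by omega)]
    have hfront : PySem.List.pyRange i (i + ((c + 1 : Nat) : Int)) 1
        = i :: PySem.List.pyRange (i + 1) (i + 1 + (c : Int)) 1 := by
      rw [PySem.List.pyRange_one_cons (by push_cast; omega)]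
      congr 1; push_cast; ring_nf
    have hback : PySem.List.pyRange (j + 1 - ((c + 1 : Nat) : Int)) (j + 1) 1
        = PySem.List.pyRange (j - 1 + 1 - (c : Int)) (j - 1 + 1) 1 ++ [j] := by
      rw [PySem.List.pyRange_one_succ_right (by push_cast; omega)]
      congr 1
      · congr 1 <;> push_cast <;> ring
    rw [hfront, hback]
    simp only [List.map_append, List.sum_cons, List.sum_append,
      List.map, List.sum_cons, List.sum_nil, digAt]
    rw [Prod.mk.injEq]
    constructor <;> omega

-- A reads index i of the mapped digit list; that is the digit at index i of the string
theorem getD_map_digit (s : List Char) (i : Int) :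
    PySem.List.pyGetD (s.map pyIntOfChar) i 0 = digAt s i := by
  have h0 : pyIntOfChar '0' = (0 : Int) := by decide
  rw [digAt, ← h0, PySem.List.pyGetD_map]

-- ===== VERDICT (by name: the statement is the Claim_ definition above) =====
theorem lucky_number_spec : Claim_equal_lucky_number := by
  intro num _
  unfold Spec_lucky_number lucky_number lucky_number_alt
  by_cases h10 : num < 10
  · simp [h10]
  · simp only [if_neg h10, PySem.List.foldl_append_singleton_eq_map, List.nil_append,
      List.length_map, PySem.List.foldl_add, getD_map_digit]
    set s := PySem.Int.toChars num with hs
    rw [luckyLoop_eq s (s.length / 2) 0 ((s.length : Int) - 1) 0 0 (by omega)]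
    have hf : PySem.Int.floordiv ((s.length : Nat) : Int) 2 = ((s.length / 2 : Nat) : Int) := by
      exact_mod_cast PySem.Int.floordiv_natCast s.length 2
    have hm : PySem.Int.mod ((s.length : Nat) : Int) 2 = ((s.length % 2 : Nat) : Int) := by
      exact_mod_cast PySem.Int.mod_natCast s.length 2
    rw [hf, hm]
    simp only [zero_add]
    rw [show (s.length : Int) - 1 + 1 = (s.length : Int) by ring]
    by_cases hodd : s.length % 2 = 0
    · rw [show (s.length : Int) - ((s.length / 2 : Nat) : Int) = ((s.length / 2 : Nat) : Int) by omega]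
      simp [hodd]
    · have h1 : s.length % 2 = 1 := by omega
      rw [show (s.length : Int) - ((s.length / 2 : Nat) : Int) = ((s.length / 2 : Nat) : Int) + 1 by omega]
      simp [h1]
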